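-- pv_equiv track=rewrite | github.com/ziyunli/pycomole | src/cs9/lists.py | keep_nth_occurrences
-- ===== SOURCE A (Python) =====
-- from collections import defaultdict
-- from typing import Dict, List
--
-- def dedup(lst: List[str]) -> List[str]:
--     """
--     Returns a copy of the input list with duplicates removed. \
--         Preserve order in the original list as much as possible \
--             (keep first occurrence).
--
--     Examples:
--         >>> dedup(["a", "b", "a", "c", "b"])
--         ['a', 'b', 'c']
--         >>> dedup(["foo", "bar", "baz", "foo", "bar"])
--         ['foo', 'bar', 'baz']
--
--     Args:
--         lst: The input list to deduplicate
--
--     Returns: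
--         a copy of the input list with duplicates removed
--
--     Notes:
--         - The perfect use case for a set.
--         - If Set is not available, use a dictionary/hash map.
--     """
--     found = set()
--     results = []
--     for w in lst:
--         if w not in found:
--             results.append(w)
--             found.add(w)
--     return results
--
-- def keep_nth_occurrences(lst: List[str], n: int) -> List[str]:
--     """
--     Returns a copy of the input list that keeps nth occurrence. \
--         Preserve order in the original list as much as possible. \
--
--     Examples:
--         >>> keep_nth_occurrences(["a", "b", "a", "c", "b"], 1)
--         ['a', 'b', 'c']
--         >>> keep_nth_occurrences(["foo", "bar", "baz", "foo", "bar"], 2)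
--         ["foo", "bar", "baz", "foo", "bar"]
--
--     Args:
--         lst: The input list to deduplicate
--         n: The nth occurrence to keep
--
--     Returns:
--         a copy of the input list that keeps nth occurrence.
--
--     Notes:
--         - Think about where a string has fewer than n occurrences. \
--             Note we keep it in the result, but alternative you can \
--                 only include nth occurrence if it exists.
--     """
--     if n < 1:
--         return []
--
--     if n == 1:
--         return dedup(lst)
--
--     found: Dict[str, int] = defaultdict(int)
--     results = []
--     for w in lst:
--         if w not in found or found[w] < n:
--             found[w] += 1
--             results.append(w)
--     return results
-- ===== SOURCE B (Python) =====
-- def keep_nth_occurrences(lst, n):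
--     if n < 1:
--         return []
--     positions = {}
--     for i, w in enumerate(lst):
--         positions.setdefault(w, []).append(i)
--     keep = set()
--     for idxs in positions.values():
--         keep.update(idxs[:n])
--     return [w for i, w in enumerate(lst) if i in keep]
-- ===== Notes on version B (the rewrite author's own statement) =====
-- stated objective: alternative
-- what changed: Replaces A's n==1 dedup special case and single running-counter scan by an index table (element -> list of its positions), a keep-set of the first n positions of each element, and an index-filtered pass over enumerate(lst).
import Mathlib
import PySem

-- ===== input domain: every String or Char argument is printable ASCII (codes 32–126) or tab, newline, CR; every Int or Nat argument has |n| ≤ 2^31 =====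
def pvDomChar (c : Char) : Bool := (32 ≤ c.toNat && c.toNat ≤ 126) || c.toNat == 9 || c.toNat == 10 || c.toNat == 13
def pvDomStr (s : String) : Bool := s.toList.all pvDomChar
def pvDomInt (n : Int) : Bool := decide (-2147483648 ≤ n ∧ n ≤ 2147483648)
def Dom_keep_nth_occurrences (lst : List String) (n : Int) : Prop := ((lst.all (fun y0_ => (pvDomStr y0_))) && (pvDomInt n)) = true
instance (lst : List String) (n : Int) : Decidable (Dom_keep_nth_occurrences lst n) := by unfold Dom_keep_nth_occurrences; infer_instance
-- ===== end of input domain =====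

-- B replaces A's n==1 dedup special case and running-counter loop by a position-index table plus a keep-set of each element's first n indices (alternative data-structure decomposition).


-- ===== PORT A =====
def dedup (lst : List String) : List String :=
  (lst.foldl
    (fun (st : PySem.Set String × List String) w =>
      if !(PySem.Set.contains st.1 w) then (PySem.Set.add st.1 w, st.2 ++ [w]) else st)
    (PySem.Set.empty, [])).2

def keep_nth_occurrences (lst : List String) (n : Int) : List String :=
  if n < 1 then []
  else if n == 1 then dedup lst
  else
    (lst.foldl
      (fun (st : PySem.Dict String Int × List String) w =>
        if !(st.1.contains w) || st.1.getD w 0 < n then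
          (st.1.modify w 0 (· + 1), st.2 ++ [w])
        else st)
      (PySem.Dict.empty, [])).2

-- ===== PORT B =====
def keep_nth_occurrences_alt (lst : List String) (n : Int) : List String :=
  if n < 1 then []
  else
    let positions : PySem.Dict String (List Int) :=
      (PySem.List.enumerate lst 0).foldl
        (fun d p => d.modify p.2 [] (· ++ [p.1])) PySem.Dict.empty
    let keep : PySem.Set Int :=
      positions.values.foldl
        (fun s idxs => PySem.Set.update s (PySem.List.slice idxs none (some n))) PySem.Set.empty
    ((PySem.List.enumerate lst 0).filter (fun p => PySem.Set.contains keep p.1)).map (·.2)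

-- ===== PRECONDITION & SPEC =====
def Spec_keep_nth_occurrences (lst : List String) (n : Int) (out : List String) : Prop := out = keep_nth_occurrences_alt lst n
instance (lst : List String) (n : Int) (out : List String) : Decidable (Spec_keep_nth_occurrences lst n out) := by unfold Spec_keep_nth_occurrences; infer_instance

-- ===== CLAIM (what is proved, stated in full; the proofs are below) =====
def Claim_equal_keep_nth_occurrences : Prop := ∀ (lst : List String) (n : Int), Dom_keep_nth_occurrences lst n → Spec_keep_nth_occurrences lst n (keep_nth_occurrences lst n)

-- ===== LEMMAS AND PROOFS =====

/-- Reference recursion: keep the element iff it occurred fewer than n times in the prefix. -/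
def keepGo (n : Int) (pre rest : List String) : List String :=
  match rest with
  | [] => []
  | w :: ws =>
    if (pre.count w : Int) < n then w :: keepGo n (pre ++ [w]) ws
    else keepGo n (pre ++ [w]) ws

lemma dedup_go (rest : List String) : ∀ (pre acc : List String),
    (rest.foldl
      (fun (st : PySem.Set String × List String) w =>
        if !(PySem.Set.contains st.1 w) then (PySem.Set.add st.1 w, st.2 ++ [w]) else st)
      (PySem.Set.ofList pre, acc)).2 = acc ++ keepGo 1 pre rest := by
  induction rest with
  | nil => intro pre acc; simp [keepGo]
  | cons w ws ih =>
    intro pre acc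
    simp only [List.foldl, keepGo]
    by_cases hmem : w ∈ pre
    · have hc : PySem.Set.contains (PySem.Set.ofList pre) w = true := by
        rw [PySem.Set.contains_iff, PySem.Set.mem_ofList]; exact hmem
      have hcnt : ¬ ((pre.count w : Int) < 1) := by
        have : 1 ≤ pre.count w := List.one_le_count_iff.mpr hmem
        omega
      rw [hc]
      simp only [Bool.not_true, Bool.false_eq_true, if_false, if_neg hcnt]
      have : PySem.Set.ofList pre = PySem.Set.ofList (pre ++ [w]) := by
        rw [PySem.Set.ofList_append_singleton, PySem.Set.add_of_mem (by rwa [PySem.Set.mem_ofList])]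
      rw [this, ih]
    · have hc : PySem.Set.contains (PySem.Set.ofList pre) w = false := by
        rw [← Bool.not_eq_true, PySem.Set.contains_iff, PySem.Set.mem_ofList]; exact hmem
      have hcnt : (pre.count w : Int) < 1 := by
        have : pre.count w = 0 := List.count_eq_zero.mpr hmem
        omega
      rw [hc]
      simp only [Bool.not_false, if_true, if_pos hcnt]
      have : PySem.Set.add (PySem.Set.ofList pre) w = PySem.Set.ofList (pre ++ [w]) := by
        rw [PySem.Set.ofList_append_singleton]
      rw [this, ih, List.append_assoc]; rfl

lemma counter_go (n : Int) (hn : 1 ≤ n) (rest : List String) :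
    ∀ (pre acc : List String) (d : PySem.Dict String Int),
    (∀ v, d.getD v 0 = min ((pre.count v : Int)) n) →
    (∀ v, d.contains v = decide (v ∈ pre)) →
    (rest.foldl
      (fun (st : PySem.Dict String Int × List String) w =>
        if !(st.1.contains w) || st.1.getD w 0 < n then
          (st.1.modify w 0 (· + 1), st.2 ++ [w])
        else st)
      (d, acc)).2 = acc ++ keepGo n pre rest := by
  induction rest with
  | nil => intro pre acc d _ _; simp [keepGo]
  | cons w ws ih =>
    intro pre acc d hd hc
    simp only [List.foldl, keepGo]
    by_cases hcnt : (pre.count w : Int) < n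
    · have hcond : (!(d.contains w) || decide (d.getD w 0 < n)) = true := by
        rw [hd w]; simp only [Bool.or_eq_true, decide_eq_true_eq]; right; omega
      simp only [hcond, if_true]
      rw [if_pos hcnt]
      rw [ih (pre ++ [w]) (acc ++ [w]) _ ?_ ?_]
      · rw [List.append_assoc]; rfl
      · intro v
        by_cases hv : v = w
        · subst hv
          rw [PySem.Dict.getD_modify_self, hd v]
          simp only [List.count_append, List.count_singleton, beq_self_eq_true, if_true]
          have h1 : (pre.count v : Int) < n := hcnt
          push_cast; omega
        · rw [PySem.Dict.getD_modify_of_ne _ _ _ hv, hd v]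
          simp [List.count_append,
            List.count_eq_zero_of_not_mem (show v ∉ [w] by simp [hv])]
      · intro v
        rw [PySem.Dict.contains_modify, hc v]
        by_cases hv : v = w <;> simp [hv]
    · have hmem : w ∈ pre := by
        by_contra hm
        have : pre.count w = 0 := List.count_eq_zero.mpr hm
        omega
      have hcond : (!(d.contains w) || decide (d.getD w 0 < n)) = false := by
        rw [hd w, hc w]
        simp [hmem]
        omega
      simp only [hcond, Bool.false_eq_true, if_false]
      rw [if_neg hcnt]
      apply ih (pre ++ [w]) acc d
      · intro v
        rw [hd v]
        by_cases hv : v = w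
        · subst hv
          simp only [List.count_append, List.count_singleton]
          push_cast; omega
        · simp [List.count_append,
            List.count_eq_zero_of_not_mem (show v ∉ [w] by simp [hv])]
      · intro v
        rw [hc v]
        by_cases hv : v = w
        · subst hv; simp [hmem]
        · simp [hv]

lemma positions_getD (l : List (Int × String)) (d : PySem.Dict String (List Int)) (w : String) :
    (l.foldl (fun d p => d.modify p.2 [] (· ++ [p.1])) d).getD w []
      = d.getD w [] ++ (l.filter (fun p => p.2 == w)).map (·.1) := by
  have h : l.foldl (fun d p => d.modify p.2 [] (· ++ [p.1])) d
      = (l.map Prod.swap).foldl (fun d q => d.modify q.1 [] (· ++ [q.2])) d := by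
    rw [List.foldl_map]; rfl
  rw [h, PySem.Dict.getD_foldl_modify_append, List.filter_map, List.map_map]
  simp [Function.comp_def, Prod.swap]

lemma mem_foldl_update {α β : Type} [BEq α] [LawfulBEq α] (f : β → List α) (l : List β) :
    ∀ (s : PySem.Set α) (y : α),
    (y ∈ l.foldl (fun s x => PySem.Set.update s (f x)) s) ↔ (y ∈ s ∨ ∃ x ∈ l, y ∈ f x) := by
  induction l with
  | nil => intro s y; simp
  | cons x xs ih =>
    intro s y
    simp only [List.foldl, ih, PySem.Set.mem_update, List.mem_cons]
    constructor
    · rintro ((h | h) | ⟨z, hz, hy⟩)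
      · exact Or.inl h
      · exact Or.inr ⟨x, Or.inl rfl, h⟩
      · exact Or.inr ⟨z, Or.inr hz, hy⟩
    · rintro (h | ⟨z, (rfl | hz), hy⟩)
      · exact Or.inl (Or.inl h)
      · exact Or.inl (Or.inr hy)
      · exact Or.inr ⟨z, hz, hy⟩

/-- Every recorded position is ≥ the enumeration start. -/
lemma posOf_lower (l : List String) (s : Int) (w : String) :
    ∀ i ∈ (((PySem.List.enumerate l s).filter (fun p => p.2 == w)).map (·.1)), s ≤ i := by
  intro i hi
  simp only [List.mem_map, List.mem_filter] at hi
  obtain ⟨p, ⟨hp, _⟩, rfl⟩ := hi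
  rw [PySem.List.mem_enumerate_iff] at hp
  obtain ⟨k, hk, rfl⟩ := hp
  omega

/-- Index s+j is among the first k positions of w ↔ the j-th element is w and
    w occurs fewer than k times before it. -/
lemma mem_take_posOf (l : List String) : ∀ (s j k : Nat) (w : String),
    (((s : Int) + (j : Int)) ∈
        ((((PySem.List.enumerate l (s : Int)).filter (fun p => p.2 == w)).map (·.1)).take k))
    ↔ (∃ h : j < l.length, l[j] = w ∧ (l.take j).count w < k) := by
  induction l with
  | nil => intro s j k w; simp [PySem.List.enumerate_nil]
  | cons x xs ih =>
    intro s j k w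
    rw [PySem.List.enumerate_cons]
    have hs1 : ((s : Int) + 1) = (((s + 1 : Nat)) : Int) := by push_cast; ring
    by_cases hx : x = w
    · subst hx
      rw [List.filter_cons_of_pos (by simp), List.map_cons]
      match k, j with
      | 0, j => simp
      | k+1, 0 =>
        simp only [List.take_succ_cons, List.mem_cons, Nat.cast_zero, add_zero]
        constructor
        · intro _; exact ⟨by simp, by simp, by simp⟩
        · intro _; exact Or.inl trivial
      | k+1, j+1 =>
        rw [List.take_succ_cons, List.mem_cons, hs1,
          show ((s : Int) + ((j + 1 : Nat) : Int)) = (((s + 1 : Nat)) : Int) + (j : Int) by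
            push_cast; ring,
          ih (s + 1) j k x]
        constructor
        · rintro (h | ⟨h, hw, hc⟩)
          · exfalso; push_cast at h; omega
          · refine ⟨by simpa using Nat.succ_lt_succ h, by simpa using hw, ?_⟩
            have heq : List.count x (List.take (j + 1) (x :: xs))
                = List.count x (List.take j xs) + 1 := by
              simp
            omega
        · rintro ⟨h, hw, hc⟩
          right
          refine ⟨by simp only [List.length_cons] at h; omega, by simpa using hw, ?_⟩
          have heq : List.count x (List.take (j + 1) (x :: xs))
              = List.count x (List.take j xs) + 1 := by
            simp
          omega
    · rw [List.filter_cons_of_neg (by simpa using hx)]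
      match j with
      | 0 =>
        simp only [Nat.cast_zero, add_zero]
        constructor
        · intro hmem
          have := posOf_lower xs ((s : Int) + 1) w _ (List.mem_of_mem_take hmem)
          omega
        · rintro ⟨h, hw, _⟩
          exact absurd (by simpa using hw) hx
      | j+1 =>
        rw [hs1,
          show ((s : Int) + ((j + 1 : Nat) : Int)) = (((s + 1 : Nat)) : Int) + (j : Int) by
            push_cast; ring,
          ih (s + 1) j k w]
        constructor
        · rintro ⟨h, hw, hc⟩
          refine ⟨by simpa using Nat.succ_lt_succ h, by simpa using hw, ?_⟩
          have heq : List.count w (List.take (j + 1) (x :: xs))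
              = List.count w (List.take j xs) := by
            simp [hx]
          omega
        · rintro ⟨h, hw, hc⟩
          refine ⟨by simp only [List.length_cons] at h; omega, by simpa using hw, ?_⟩
          have heq : List.count w (List.take (j + 1) (x :: xs))
              = List.count w (List.take j xs) := by
            simp [hx]
          omega

lemma mem_take_posOf_zero (l : List String) (j k : Nat) (w : String) :
    ((j : Int) ∈
        ((((PySem.List.enumerate l 0).filter (fun p => p.2 == w)).map (·.1)).take k))
    ↔ (∃ h : j < l.length, l[j] = w ∧ (l.take j).count w < k) := by
  have := mem_take_posOf l 0 j k w
  simpa using this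

lemma keep_mem_iff (lst : List String) (n : Int) (hn : ¬ n < 1) (j : Nat) (hj : j < lst.length) :
    ((j : Int) ∈
      (((PySem.List.enumerate lst 0).foldl
          (fun d p => d.modify p.2 [] (· ++ [p.1])) PySem.Dict.empty).values.foldl
        (fun s idxs => PySem.Set.update s (PySem.List.slice idxs none (some n))) PySem.Set.empty))
    ↔ ((lst.take j).count lst[j] : Int) < n := by
  have h0 : (0 : Int) ≤ n := by omega
  have hslice : ∀ idxs : List Int,
      PySem.List.slice idxs none (some n) = idxs.take n.toNat := fun idxs =>
    PySem.List.slice_to idxs h0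
  simp only [hslice]
  rw [mem_foldl_update (fun idxs : List Int => idxs.take n.toNat)
      ((PySem.List.enumerate lst 0).foldl
        (fun d p => d.modify p.2 [] (· ++ [p.1])) PySem.Dict.empty).values
      PySem.Set.empty (j : Int)]
  have hnd : (((PySem.List.enumerate lst 0).foldl
      (fun d p => d.modify p.2 [] (· ++ [p.1])) PySem.Dict.empty)).keys.Nodup := by
    exact PySem.Dict.nodup_keys_foldl_modify_key (PySem.List.enumerate lst 0) (fun p => p.2) []
      (fun _ p => (· ++ [p.1])) PySem.Dict.empty PySem.Dict.nodup_keys_empty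
  rw [PySem.Dict.values_eq_map_keys _ hnd []]
  constructor
  · rintro (h | ⟨v, hv, hmem⟩)
    · exact absurd h (by simp [PySem.Set.empty])
    · rw [List.mem_map] at hv
      obtain ⟨w, _, rfl⟩ := hv
      rw [positions_getD] at hmem
      simp only [PySem.Dict.getD] at hmem
      rw [show (PySem.Dict.empty : PySem.Dict String (List Int)).get? w = none from rfl] at hmem
      simp only [Option.getD_none, List.nil_append] at hmem
      rw [mem_take_posOf_zero] at hmem
      obtain ⟨h', hw, hc⟩ := hmem
      subst hw
      omega
  · intro hc
    right
    refine ⟨((PySem.List.enumerate lst 0).filter (fun p => p.2 == lst[j])).map (·.1), ?_, ?_⟩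
    · rw [List.mem_map]
      refine ⟨lst[j], ?_, ?_⟩
      · rw [← PySem.Dict.contains_iff_mem_keys, PySem.Dict.contains_eq_isSome_get?]
        have : (((PySem.List.enumerate lst 0).foldl
            (fun d p => d.modify p.2 [] (· ++ [p.1])) PySem.Dict.empty)).getD lst[j] []
            = ((PySem.List.enumerate lst 0).filter (fun p => p.2 == lst[j])).map (·.1) := by
          rw [positions_getD]
          rw [show (PySem.Dict.empty : PySem.Dict String (List Int)).getD lst[j] [] = [] from rfl]
          simp
        -- lst[j] appears in the enumerate, so its position list is nonempty, so the key is present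
        have hjmem : ((j : Int), lst[j]) ∈ PySem.List.enumerate lst 0 := by
          rw [PySem.List.mem_enumerate_iff]
          exact ⟨j, hj, by simp⟩
        rcases hget : (((PySem.List.enumerate lst 0).foldl
            (fun d p => d.modify p.2 [] (· ++ [p.1])) PySem.Dict.empty)).get? lst[j] with _ | v
        · exfalso
          have hd0 : (((PySem.List.enumerate lst 0).foldl
              (fun d p => d.modify p.2 [] (· ++ [p.1])) PySem.Dict.empty)).getD lst[j] [] = [] := by
            rw [PySem.Dict.getD_eq_get?_getD, hget]; rfl
          rw [this] at hd0
          have : ((j : Int), lst[j]) ∈ (PySem.List.enumerate lst 0).filter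
              (fun p => p.2 == lst[j]) := List.mem_filter.mpr ⟨hjmem, by simp⟩
          have : ((j : Int)) ∈ ((PySem.List.enumerate lst 0).filter
              (fun p => p.2 == lst[j])).map (·.1) := List.mem_map.mpr ⟨_, this, rfl⟩
          rw [hd0] at this
          simp at this
        · rw [hget]; rfl
      · rw [positions_getD]
        rw [show (PySem.Dict.empty : PySem.Dict String (List Int)).getD lst[j] [] = [] from rfl]
        simp
    · rw [mem_take_posOf_zero]
      exact ⟨hj, rfl, by omega⟩

lemma alt_filter_go (n : Int) (lst : List String) (keepS : PySem.Set Int)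
    (hkeep : ∀ (j : Nat), j < lst.length →
      (((j : Int) ∈ keepS) ↔ ((lst.take j).count (lst.getD j "") : Int) < n)) :
    ∀ (rest pre : List String), pre ++ rest = lst →
    ((PySem.List.enumerate rest (pre.length : Int)).filter
        (fun p => PySem.Set.contains keepS p.1)).map (·.2)
      = keepGo n pre rest := by
  intro rest
  induction rest with
  | nil => intro pre _; simp [PySem.List.enumerate_nil, keepGo]
  | cons w ws ih =>
    intro pre hpre
    rw [PySem.List.enumerate_cons, keepGo]
    have hj : pre.length < lst.length := by rw [← hpre]; simp
    have helem : lst.getD pre.length "" = w := by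
      rw [← hpre, List.getD_eq_getElem _ _ (by simp), List.getElem_append_right (Nat.le_refl _)]
      simp
    have htake : lst.take pre.length = pre := by rw [← hpre]; exact List.take_left
    have hk := hkeep pre.length hj
    rw [helem, htake] at hk
    have hrec := ih (pre ++ [w]) (by simpa using hpre)
    rw [show (((pre ++ [w]).length : Int)) = ((pre.length : Int) + 1) by simp] at hrec
    by_cases hc : ((pre.count w : Int)) < n
    · rw [List.filter_cons_of_pos (by
        simpa using (PySem.Set.contains_iff _ _).mpr (hk.mpr hc)), List.map_cons, hrec, if_pos hc]
    · rw [List.filter_cons_of_neg (by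
        intro hcontra
        exact hc (hk.mp ((PySem.Set.contains_iff _ _).mp (by simpa using hcontra)))), hrec, if_neg hc]

lemma dedup_eq_keepGo (lst : List String) : dedup lst = keepGo 1 [] lst := by
  have := dedup_go lst [] []
  simpa [dedup, PySem.Set.ofList] using this

lemma alt_eq_keepGo (n : Int) (hn : ¬ n < 1) (lst : List String) :
    keep_nth_occurrences_alt lst n = keepGo n [] lst := by
  rw [keep_nth_occurrences_alt, if_neg hn]
  have hkeep : ∀ (j : Nat), j < lst.length →
      (((j : Int) ∈
        (((PySem.List.enumerate lst 0).foldl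
            (fun d p => d.modify p.2 [] (· ++ [p.1])) PySem.Dict.empty).values.foldl
          (fun s idxs => PySem.Set.update s (PySem.List.slice idxs none (some n)))
          PySem.Set.empty)) ↔ ((lst.take j).count (lst.getD j "") : Int) < n) := by
    intro j hj
    rw [List.getD_eq_getElem _ _ hj]
    exact keep_mem_iff lst n hn j hj
  have := alt_filter_go n lst _ hkeep lst [] rfl
  simpa using this

-- ===== VERDICT (by name: the statement is the Claim_ definition above) =====
theorem keep_nth_occurrences_spec : Claim_equal_keep_nth_occurrences := by
  intro lst n _
  show keep_nth_occurrences lst n = keep_nth_occurrences_alt lst n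
  rw [keep_nth_occurrences]
  by_cases h1 : n < 1
  · rw [if_pos h1, keep_nth_occurrences_alt, if_pos h1]
  · rw [if_neg h1, alt_eq_keepGo n h1]
    by_cases h2 : n = 1
    · subst h2
      simp only [BEq.rfl, if_true]
      exact dedup_eq_keepGo lst
    · rw [if_neg (by simpa using h2)]
      apply counter_go n (by omega) lst [] []
      · intro v
        simp [PySem.Dict.getD, PySem.Dict.empty, PySem.Dict.get?]
        omega
      · intro v; simp [PySem.Dict.contains, PySem.Dict.empty]
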